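-- pv_equiv track=rewrite | github.com/zshuzh/aoc-24 | day14.py | contiguous
-- ===== SOURCE A (Python) =====
-- def contiguous(matrix):
--     c = []
--     for row in matrix:
--         max = curr = 0
--         for el in row:
--             curr = 0 if el == 0 else curr + 1
--
--             if curr > max:
--                 max = curr
--
--         if max > 1:
--             c.append(max)
--
--     return sum(c)
-- ===== SOURCE B (Python) =====
-- def contiguous(matrix):
--     def longest(row):
--         zeros = [-1] + [i for i, el in enumerate(row) if el == 0] + [len(row)]
--         return max(b - a - 1 for a, b in zip(zeros, zeros[1:]))
--     return sum(m for m in map(longest, matrix) if m > 1)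
-- ===== Notes on version B (the rewrite author's own statement) =====
-- stated objective: alternative
-- what changed: Instead of scanning each row with a running-run counter and max register, B records the indices of the zeros (with sentinels -1 and len(row)) and takes the largest gap between consecutive zero positions, then sums via a map/filter/sum pipeline.
import Mathlib
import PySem

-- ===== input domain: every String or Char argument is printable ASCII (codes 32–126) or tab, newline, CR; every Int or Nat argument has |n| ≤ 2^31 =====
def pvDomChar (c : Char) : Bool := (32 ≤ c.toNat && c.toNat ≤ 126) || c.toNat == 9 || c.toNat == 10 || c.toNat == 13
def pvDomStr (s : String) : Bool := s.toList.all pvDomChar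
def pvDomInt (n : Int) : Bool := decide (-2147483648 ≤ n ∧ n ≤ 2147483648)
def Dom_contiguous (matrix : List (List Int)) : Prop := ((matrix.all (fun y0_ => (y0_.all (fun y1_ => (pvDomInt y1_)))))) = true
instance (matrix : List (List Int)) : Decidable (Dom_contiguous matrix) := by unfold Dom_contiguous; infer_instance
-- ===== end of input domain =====

-- B replaces A's running-run-counter scan with a zero-position/gap computation:
-- the longest nonzero run of a row is the largest gap between consecutive zero
-- positions (sentinels -1 and len(row)); rows are combined by map/filter/sum (alternative; same cost).

-- ===== PORT A =====
-- A's inner loop body: state (max, curr); `curr = 0 if el == 0 else curr + 1`, then `if curr > max: max = curr`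
def stepA (p : Int × Int) (el : Int) : Int × Int :=
  let curr : Int := if el = 0 then 0 else p.2 + 1
  let mx : Int := if curr > p.1 then curr else p.1
  (mx, curr)

def contiguous (matrix : List (List Int)) : Int :=
  (matrix.foldl
    (fun (c : List Int) row =>
      let st := row.foldl stepA (0, 0)
      if st.1 > 1 then c ++ [st.1] else c) []).sum

-- ===== PORT B =====
-- zeros = [-1] + [i for i, el in enumerate(row) if el == 0] + [len(row)]
def zerosB (row : List Int) : List Int :=
  -1 :: (((PySem.List.enumerate row).filter (fun p => p.2 == 0)).map (fun p => p.1) ++ [(row.length : Int)])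

-- Python's max on a nonempty list (here the gaps list always has at least one
-- element, since zerosB always has at least two; the [] branch is unreachable)
def pyMaxB : List Int → Int
  | [] => 0
  | x :: xs => xs.foldl max x

-- max(b - a - 1 for a, b in zip(zeros, zeros[1:]))
def longestB (row : List Int) : Int :=
  let zs := zerosB row
  pyMaxB ((zs.zip zs.tail).map (fun p => p.2 - p.1 - 1))

-- sum(m for m in map(longest, matrix) if m > 1)
def contiguous_alt (matrix : List (List Int)) : Int :=
  ((matrix.map longestB).filter (fun m => decide (m > 1))).sum

-- ===== PRECONDITION & SPEC =====
def Spec_contiguous (matrix : List (List Int)) (out : Int) : Prop := out = contiguous_alt matrix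
instance (matrix : List (List Int)) (out : Int) : Decidable (Spec_contiguous matrix out) := by unfold Spec_contiguous; infer_instance

-- ===== CLAIM (what is proved, stated in full; the proofs are below) =====
def Claim_equal_contiguous : Prop := ∀ (matrix : List (List Int)), Dom_contiguous matrix → Spec_contiguous matrix (contiguous matrix)

-- ===== LEMMAS AND PROOFS =====

-- spec: max run length in `row`, where the run currently in progress already has length `curr`
def specMax (curr : Int) : List Int → Int
  | [] => curr
  | x :: xs => if x = 0 then max curr (specMax 0 xs) else specMax (curr + 1) xs

theorem specMax_ge (xs : List Int) : ∀ curr : Int, curr ≤ specMax curr xs := by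
  induction xs with
  | nil => intro curr; simp [specMax]
  | cons x xs ih =>
    intro curr
    by_cases h : x = 0
    · simp only [specMax, if_pos h]
      exact le_max_left _ _
    · simp only [specMax, if_neg h]
      exact le_trans (by omega) (ih (curr + 1))

theorem stepA_eq (a b el : Int) :
    stepA (a, b) el = (max a (if el = 0 then 0 else b + 1), if el = 0 then 0 else b + 1) := by
  by_cases h : el = 0
  · simp only [stepA, if_pos h, Prod.mk.injEq]
    exact ⟨by split_ifs <;> omega, trivial⟩
  · simp only [stepA, if_neg h, Prod.mk.injEq]
    exact ⟨by split_ifs <;> omega, trivial⟩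

-- A's inner loop equals specMax
theorem rowA (xs : List Int) : ∀ mx curr : Int, 0 ≤ curr → curr ≤ mx →
    (xs.foldl stepA (mx, curr)).1 = max mx (specMax curr xs) := by
  induction xs with
  | nil => intro mx curr _ h2; simp only [List.foldl_nil, specMax]; omega
  | cons x xs ih =>
    intro mx curr h1 h2
    rw [List.foldl_cons, stepA_eq]
    by_cases hx : x = 0
    · rw [if_pos hx]
      have hmax : max mx (0 : Int) = mx := by omega
      rw [hmax, ih mx 0 le_rfl (by omega)]
      simp only [specMax, if_pos hx]
      omega
    · rw [if_neg hx]
      have hge := specMax_ge xs (curr + 1)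
      rw [ih (max mx (curr + 1)) (curr + 1) (by omega) (le_max_right _ _)]
      simp only [specMax, if_neg hx]
      omega

theorem rowA0 (row : List Int) :
    (row.foldl stepA (0, 0)).1 = specMax 0 row := by
  rw [rowA row 0 0 le_rfl le_rfl]
  have := specMax_ge row (0 : Int)
  omega

-- B-side: recursive characterisation of the zero-index list
def zIdx (j : Int) : List Int → List Int
  | [] => []
  | x :: xs => if x = 0 then j :: zIdx (j + 1) xs else zIdx (j + 1) xs

theorem enum_filter_eq_zIdx (row : List Int) : ∀ s : Int,
    ((PySem.List.enumerate row s).filter (fun p => p.2 == 0)).map (fun p => p.1) = zIdx s row := by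
  induction row with
  | nil => intro s; simp [PySem.List.enumerate_nil, zIdx]
  | cons x xs ih =>
    intro s
    rw [PySem.List.enumerate_cons]
    by_cases hx : x = 0
    · simp [hx, zIdx, ih (s + 1)]
    · simp [hx, zIdx, ih (s + 1)]

-- gaps helper lemmas
theorem zip_gaps_cons (a b : Int) (t : List Int) :
    (((a :: b :: t).zip (a :: b :: t).tail).map (fun p => p.2 - p.1 - 1))
      = (b - a - 1) :: (((b :: t).zip (b :: t).tail).map (fun p => p.2 - p.1 - 1)) := by
  simp [List.zip]

theorem foldl_max_max (t : List Int) : ∀ a b : Int, t.foldl max (max a b) = max a (t.foldl max b) := by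
  induction t with
  | nil => intro a b; simp
  | cons x xs ih =>
    intro a b
    simp only [List.foldl_cons]
    rw [max_assoc, ih]

theorem pyMaxB_cons (a : Int) (l : List Int) (h : l ≠ []) :
    pyMaxB (a :: l) = max a (pyMaxB l) := by
  cases l with
  | nil => exact absurd rfl h
  | cons b t =>
    simp only [pyMaxB, List.foldl_cons]
    rw [foldl_max_max]

theorem gaps_ne_nil (a : Int) (l : List Int) (e : Int) :
    ((a :: (l ++ [e])).zip (a :: (l ++ [e])).tail).map (fun p => p.2 - p.1 - 1) ≠ [] := by
  cases l with
  | nil => simp [List.zip]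
  | cons b t => rw [List.cons_append, zip_gaps_cons]; simp

-- the main B-side invariant: gaps of (prev :: zeros from index j ++ [j + len])
-- compute specMax with a run in progress of length j - prev - 1
theorem gapsMax (row : List Int) : ∀ j prev : Int, prev < j →
    pyMaxB (((prev :: (zIdx j row ++ [j + row.length])).zip
        (prev :: (zIdx j row ++ [j + row.length])).tail).map (fun p => p.2 - p.1 - 1))
      = specMax (j - prev - 1) row := by
  induction row with
  | nil =>
    intro j prev _
    simp [zIdx, List.zip, pyMaxB, specMax]
  | cons x xs ih =>
    intro j prev hpj
    by_cases hx : x = 0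
    · have hz : zIdx j (x :: xs) = j :: zIdx (j + 1) xs := by simp [zIdx, hx]
      rw [hz, List.cons_append, zip_gaps_cons]
      have hlen : j + ((x :: xs).length : Int) = (j + 1) + (xs.length : Int) := by
        simp [List.length_cons]; ring
      rw [hlen]
      rw [pyMaxB_cons _ _ (gaps_ne_nil _ _ _)]
      rw [ih (j + 1) j (by omega)]
      have h1 : (j : Int) + 1 - j - 1 = 0 := by ring
      rw [h1]
      simp only [specMax, if_pos hx]
    · have hz : zIdx j (x :: xs) = zIdx (j + 1) xs := by simp [zIdx, hx]
      rw [hz]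
      have hlen : j + ((x :: xs).length : Int) = (j + 1) + (xs.length : Int) := by
        simp [List.length_cons]; ring
      rw [hlen]
      rw [ih (j + 1) prev (by omega)]
      have h1 : (j : Int) + 1 - prev - 1 = (j - prev - 1) + 1 := by ring
      rw [h1]
      simp only [specMax, if_neg hx]

theorem longestB_eq (row : List Int) : longestB row = specMax 0 row := by
  unfold longestB zerosB
  rw [enum_filter_eq_zIdx row 0]
  have h := gapsMax row 0 (-1) (by omega)
  simp only [zero_add] at h
  simpa using h

-- per-matrix sum
def specSum : List (List Int) → Int
  | [] => 0
  | r :: rs => (if specMax 0 r > 1 then specMax 0 r else 0) + specSum rs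

theorem matA (ms : List (List Int)) : ∀ c : List Int,
    ((ms.foldl
      (fun (c : List Int) row =>
        let st := row.foldl stepA (0, 0)
        if st.1 > 1 then c ++ [st.1] else c) c).sum : Int) = c.sum + specSum ms := by
  induction ms with
  | nil => intro c; simp [specSum]
  | cons r rs ih =>
    intro c
    rw [List.foldl_cons]
    dsimp only
    rw [rowA0 r]
    by_cases h : specMax 0 r > 1
    · rw [if_pos h, ih, specSum, if_pos h]
      simp [List.sum_append]
      omega
    · rw [if_neg h, ih, specSum, if_neg h]
      omega

theorem matB (ms : List (List Int)) :
    ((ms.map longestB).filter (fun m => decide (m > 1))).sum = specSum ms := by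
  induction ms with
  | nil => simp [specSum]
  | cons r rs ih =>
    simp only [List.map_cons, List.filter_cons, longestB_eq]
    by_cases h : specMax 0 r > 1
    · simp only [h, decide_true, if_true, List.sum_cons, specSum, ih]
    · simp only [h, decide_false, Bool.false_eq_true, if_false, specSum, ih]
      omega

-- ===== VERDICT (by name: the statement is the Claim_ definition above) =====
theorem contiguous_spec : Claim_equal_contiguous := by
  intro matrix _
  unfold Spec_contiguous contiguous contiguous_alt
  rw [matA matrix [], matB matrix]
  simp
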